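-- pv_equiv track=rewrite | github.com/LuJunru/TranCLR | code/utils.py | unflatten_vector
-- ===== SOURCE A (Python) =====
-- def unflatten_vector(vector, offsets):
--
--     new_vectors = []
--     start = 0
--     for b in range(len(offsets)):
--         offset = len(offsets[b])
--         new_vectors.append(vector[start:start+offset])
--         start += offset
--
--     assert start == len(vector)
--     return new_vectors
-- ===== SOURCE B (Python) =====
-- def unflatten_vector(vector, offsets):
--     # The offset groups must tile the vector exactly.
--     assert sum(len(o) for o in offsets) == len(vector)
--     # Consume the vector: split off the front chunk for each offset group,
--     # carrying only the unconsumed remainder (no start index, no bounds).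
--     new_vectors = []
--     rest = vector
--     for o in offsets:
--         k = len(o)
--         new_vectors.append(rest[:k])
--         rest = rest[k:]
--     return new_vectors
-- ===== Notes on version B (the rewrite author's own statement) =====
-- stated objective: alternative
-- what changed: B keeps no start index at all: it consumes the vector by repeatedly splitting off the front chunk and carrying only the unconsumed remainder, while A slices the original vector at a running offset
import Mathlib
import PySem

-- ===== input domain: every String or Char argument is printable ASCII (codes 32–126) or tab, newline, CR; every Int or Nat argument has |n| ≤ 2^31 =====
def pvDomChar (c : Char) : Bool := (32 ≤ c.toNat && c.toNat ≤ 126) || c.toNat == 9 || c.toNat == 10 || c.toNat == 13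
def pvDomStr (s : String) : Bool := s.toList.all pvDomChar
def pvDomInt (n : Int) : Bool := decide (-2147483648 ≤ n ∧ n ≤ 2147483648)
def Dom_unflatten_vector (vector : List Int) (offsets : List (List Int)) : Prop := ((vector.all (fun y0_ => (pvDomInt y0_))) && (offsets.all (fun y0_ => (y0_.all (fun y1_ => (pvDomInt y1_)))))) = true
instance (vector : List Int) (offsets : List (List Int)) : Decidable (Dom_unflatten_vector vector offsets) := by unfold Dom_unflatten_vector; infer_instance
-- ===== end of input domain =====

-- B keeps no start index: it consumes the vector, splitting off the front chunk for
-- each offset group and carrying only the unconsumed remainder (alternative; same cost).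

-- ===== PORT A =====
-- A: loop over offsets carrying an Int 'start', appending vector[start:start+len(offsets[b])].
def unflatten_vector (vector : List Int) (offsets : List (List Int)) : List (List Int) :=
  (offsets.foldl
    (fun acc o =>
      (acc.1 ++ [PySem.List.slice vector (some acc.2) (some (acc.2 + (o.length : Int)))],
       acc.2 + (o.length : Int)))
    ([], 0)).1

-- ===== PORT B =====
-- B's loop: for each offset group take rest[:k] and keep rest[k:]; structural recursion
-- over offsets with the remainder as state (the loop's appends build the list head-first).
def pvChop (rest : List Int) (offsets : List (List Int)) : List (List Int) :=
  match offsets with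
  | [] => []
  | o :: t =>
      PySem.List.slice rest none (some (o.length : Int)) ::
        pvChop (PySem.List.slice rest (some (o.length : Int)) none) t

def unflatten_vector_alt (vector : List Int) (offsets : List (List Int)) : List (List Int) :=
  pvChop vector offsets

-- ===== PRECONDITION & SPEC =====
-- Pre_: the offset lengths must sum to len(vector); otherwise Python A's assert raises.
def Pre_unflatten_vector (vector : List Int) (offsets : List (List Int)) : Prop :=
  (offsets.map List.length).sum = vector.length
instance (vector : List Int) (offsets : List (List Int)) : Decidable (Pre_unflatten_vector vector offsets) := by unfold Pre_unflatten_vector; infer_instance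

def pvWitness_unflatten_vector : List Int × List (List Int) := ([1, 2, 3], [[7], [8, 9]])

def Spec_unflatten_vector (vector : List Int) (offsets : List (List Int)) (out : List (List Int)) : Prop := out = unflatten_vector_alt vector offsets
instance (vector : List Int) (offsets : List (List Int)) (out : List (List Int)) : Decidable (Spec_unflatten_vector vector offsets out) := by unfold Spec_unflatten_vector; infer_instance

-- ===== CLAIM (what is proved, stated in full; the proofs are below) =====
def Claim_equal_unflatten_vector : Prop := ∀ (vector : List Int) (offsets : List (List Int)), Dom_unflatten_vector vector offsets → Pre_unflatten_vector vector offsets → Spec_unflatten_vector vector offsets (unflatten_vector vector offsets)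

-- ===== LEMMAS AND PROOFS =====
-- Invariant: A's fold from (init, s) appends exactly the chunks B cuts from vector.drop s.
lemma unflatten_key (offsets : List (List Int)) (vector : List Int)
    (init : List (List Int)) (s : Nat) :
    (offsets.foldl
      (fun acc o =>
        (acc.1 ++ [PySem.List.slice vector (some acc.2) (some (acc.2 + (o.length : Int)))],
         acc.2 + (o.length : Int)))
      (init, (s : Int))).1
    = init ++ pvChop (vector.drop s) offsets := by
  induction offsets generalizing init s with
  | nil => simp [pvChop]
  | cons o rest ih =>
    simp only [List.foldl_cons, pvChop]
    have hs : ((s : Int) + (o.length : Int)) = ((s + o.length : Nat) : Int) := by push_cast; ring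
    rw [hs, ih]
    simp [PySem.List.slice_natCast_add, PySem.List.slice_to_natCast,
      PySem.List.slice_from_natCast, List.drop_drop]

-- ===== VERDICT (by name: the statement is the Claim_ definition above) =====
theorem unflatten_vector_spec : Claim_equal_unflatten_vector := by
  intro vector offsets _ _
  show _ = unflatten_vector_alt vector offsets
  unfold unflatten_vector unflatten_vector_alt
  simpa using unflatten_key offsets vector [] 0
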